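-- pv_equiv track=rewrite | github.com/HoangNghiemLy/Data-Structures-and-Algorithms-using-Python | basic/baitapvonglap.16.py | sapXepDuongAm
-- ===== SOURCE A (Python) =====
-- def sapXepDuongAm(list):
--     listDuong = []
--     listAm = []
--     for i in list:
--         if i > 0:
--             listDuong.append(i)
--         else:
--             listAm.append(i)
--     return listDuong + listAm
-- ===== SOURCE B (Python) =====
-- def sapXepDuongAm(list):
--     return sorted(list, key=lambda x: 0 if x > 0 else 1)
-- ===== Notes on version B (the rewrite author's own statement) =====
-- stated objective: idiomatic
-- what changed: Replaces the explicit two-accumulator partition loop with a single stable sort keyed 0 for positives and 1 for non-positives; stability preserves the original relative order within each block.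
import Mathlib
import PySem

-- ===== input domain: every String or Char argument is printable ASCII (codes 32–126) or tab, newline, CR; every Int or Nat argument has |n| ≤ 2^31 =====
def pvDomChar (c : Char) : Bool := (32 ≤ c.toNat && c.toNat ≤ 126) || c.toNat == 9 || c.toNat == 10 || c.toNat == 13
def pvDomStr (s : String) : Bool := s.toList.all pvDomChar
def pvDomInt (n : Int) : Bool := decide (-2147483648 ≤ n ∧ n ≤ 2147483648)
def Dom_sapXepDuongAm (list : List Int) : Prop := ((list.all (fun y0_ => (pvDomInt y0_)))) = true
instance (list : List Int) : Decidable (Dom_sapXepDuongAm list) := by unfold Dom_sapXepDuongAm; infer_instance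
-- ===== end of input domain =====

-- B replaces A's explicit two-accumulator partition loop with one stable sort keyed 0/1 (idiomatic, same result).

-- ===== PORT A =====
-- for-loop appending to listDuong/listAm, then listDuong + listAm
def sapXepDuongAm (list : List Int) : List Int :=
  let acc := list.foldl
    (fun (s : List Int × List Int) i =>
      if i > 0 then (s.1 ++ [i], s.2) else (s.1, s.2 ++ [i]))
    ([], [])
  acc.1 ++ acc.2

-- ===== PORT B =====
def sapXepDuongAm_alt (list : List Int) : List Int :=
  PySem.List.sorted list (fun x => if x > 0 then (0 : Int) else 1)

-- ===== PRECONDITION & SPEC =====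
def Spec_sapXepDuongAm (list : List Int) (out : List Int) : Prop := out = sapXepDuongAm_alt list
instance (list : List Int) (out : List Int) : Decidable (Spec_sapXepDuongAm list out) := by unfold Spec_sapXepDuongAm; infer_instance

-- ===== CLAIM (what is proved, stated in full; the proofs are below) =====
def Claim_equal_sapXepDuongAm : Prop := ∀ (list : List Int), Dom_sapXepDuongAm list → Spec_sapXepDuongAm list (sapXepDuongAm list)

-- ===== LEMMAS AND PROOFS =====

def pvKey (x : Int) : Int := if x > 0 then 0 else 1

def pvBef (a b : Int) : Bool := decide (pvKey a < pvKey b)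

theorem pvBef_false_of_pos {x y : Int} (hy : 0 < y) : pvBef x y = false := by
  simp only [pvBef, pvKey, if_pos hy]
  split <;> simp

theorem pvBef_false_of_nonpos {x : Int} (hx : ¬ 0 < x) (y : Int) : pvBef x y = false := by
  simp only [pvBef, pvKey, if_neg hx]
  split <;> simp <;> omega

theorem insertBy_append_left {x : Int} (P N : List Int) (h : ∀ y ∈ P, pvBef x y = false) :
    PySem.List.insertBy pvBef x (P ++ N) = P ++ PySem.List.insertBy pvBef x N := by
  induction P with
  | nil => rfl
  | cons p ps ih =>
    simp only [List.cons_append, PySem.List.insertBy, h p (by simp)]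
    simp [ih (fun y hy => h y (by simp [hy]))]

theorem insertBy_pos {x : Int} (hx : 0 < x) (N : List Int) (hN : ∀ y ∈ N, ¬ 0 < y) :
    PySem.List.insertBy pvBef x N = x :: N := by
  cases N with
  | nil => rfl
  | cons n ns =>
    have : pvBef x n = true := by
      have hn := hN n (by simp)
      simp [pvBef, pvKey, if_pos hx, if_neg hn]
    simp [PySem.List.insertBy, this]

theorem pv_main (l P N : List Int) (hP : ∀ y ∈ P, 0 < y) (hN : ∀ y ∈ N, ¬ 0 < y) :
    l.foldl (fun acc x => PySem.List.insertBy pvBef x acc) (P ++ N) =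
      (l.foldl (fun (s : List Int × List Int) i =>
        if i > 0 then (s.1 ++ [i], s.2) else (s.1, s.2 ++ [i])) (P, N)).1 ++
      (l.foldl (fun (s : List Int × List Int) i =>
        if i > 0 then (s.1 ++ [i], s.2) else (s.1, s.2 ++ [i])) (P, N)).2 := by
  induction l generalizing P N with
  | nil => simp
  | cons x xs ih =>
    simp only [List.foldl_cons]
    by_cases hx : 0 < x
    · have h1 : PySem.List.insertBy pvBef x (P ++ N) = (P ++ [x]) ++ N := by
        rw [insertBy_append_left P N (fun y hy => pvBef_false_of_pos (hP y hy)),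
            insertBy_pos hx N hN]
        simp
      rw [h1, if_pos hx]
      exact ih (P ++ [x]) N
        (by intro y hy; rcases List.mem_append.mp hy with h | h
            · exact hP y h
            · simp at h; omega) hN
    · have h1 : PySem.List.insertBy pvBef x (P ++ N) = P ++ (N ++ [x]) := by
        rw [PySem.List.insertBy_of_forall_not_before _ _ _
              (fun y _ => pvBef_false_of_nonpos hx y)]
        simp
      rw [h1, if_neg hx]
      exact ih P (N ++ [x]) hP
        (by intro y hy; rcases List.mem_append.mp hy with h | h
            · exact hN y h
            · simp at h; omega)

-- ===== VERDICT (by name: the statement is the Claim_ definition above) =====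
theorem sapXepDuongAm_spec : Claim_equal_sapXepDuongAm := by
  intro list _
  show sapXepDuongAm list = sapXepDuongAm_alt list
  unfold sapXepDuongAm sapXepDuongAm_alt
  rw [PySem.List.sorted_eq_foldl_insertBy]
  exact (pv_main list [] [] (by simp) (by simp)).symm
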